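-- pv_equiv track=rewrite | github.com/alphabet-al/AOC | 2023/Day_15/LL.py | remove_by_label
-- ===== SOURCE A (Python) =====
-- def remove_by_label(label, dq):
--     found = None
--     ind = 0
--     lens_number = 0
--     for index, item in enumerate(dq):
--         if item[0] == label:
--             found = item
--             lens_number = item[1]
--             ind = index
--
--     if found:
--         dq.remove(found)
--         return ind, lens_number
--     else:
--         return found
-- ===== SOURCE B (Python) =====
-- def remove_by_label(label, dq):
--     found = None
--     for j, item in enumerate(reversed(dq)):
--         if item[0] == label:
--             found = item
--             ind = len(dq) - 1 - j
--             lens_number = item[1]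
--             break
--     if found is None:
--         return None
--     dq.remove(found)
--     return ind, lens_number
-- ===== Notes on version B (the rewrite author's own statement) =====
-- stated objective: alternative
-- what changed: B scans the deque from the end and stops at the first match (which is A's last forward match) instead of A's full forward scan that keeps overwriting the found item, then performs the same dq.remove.
import Mathlib
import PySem

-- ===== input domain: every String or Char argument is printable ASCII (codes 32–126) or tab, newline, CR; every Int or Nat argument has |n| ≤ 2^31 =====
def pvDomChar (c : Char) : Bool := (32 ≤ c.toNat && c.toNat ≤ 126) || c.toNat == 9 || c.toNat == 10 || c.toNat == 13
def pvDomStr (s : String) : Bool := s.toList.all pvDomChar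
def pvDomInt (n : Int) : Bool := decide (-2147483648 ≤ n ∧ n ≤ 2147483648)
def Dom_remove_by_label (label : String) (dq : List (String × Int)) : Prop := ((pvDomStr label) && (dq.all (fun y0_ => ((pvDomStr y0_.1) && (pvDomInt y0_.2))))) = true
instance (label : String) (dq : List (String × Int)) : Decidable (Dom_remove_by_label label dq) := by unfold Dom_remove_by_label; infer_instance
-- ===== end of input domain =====

-- B replaces A's full forward scan (overwriting the last match) by a reverse scan with early
-- exit at the first match; both also remove the found item from dq in-place (identical mutation),
-- and the equivalence proved here is about the return value.

-- ===== PORT A =====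
-- forward scan over enumerate(dq), state = (found, ind, lens_number), overwriting on each match
def remove_by_label (label : String) (dq : List (String × Int)) : Option (Int × Int) :=
  let st := (PySem.List.enumerate dq 0).foldl
    (fun (s : Option (String × Int) × Int × Int) (p : Int × (String × Int)) =>
      if p.2.1 == label then (some p.2, p.1, p.2.2) else s)
    (none, 0, 0)
  match st.1 with
  | some _ => some (st.2.1, st.2.2)   -- dq.remove(found) mutates dq only; return value is (ind, lens_number)
  | none => none

-- ===== PORT B =====
-- reverse scan with early exit: j counts reversed positions, index reported is n-1-j
def pvRevSearch (label : String) (n : Int) : Int → List (String × Int) → Option (Int × Int)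
  | _, [] => none
  | j, x :: rest => if x.1 == label then some (n - 1 - j, x.2) else pvRevSearch label n (j + 1) rest

def remove_by_label_alt (label : String) (dq : List (String × Int)) : Option (Int × Int) :=
  pvRevSearch label (dq.length : Int) 0 dq.reverse

-- ===== PRECONDITION & SPEC =====
def Spec_remove_by_label (label : String) (dq : List (String × Int)) (out : Option (Int × Int)) : Prop := out = remove_by_label_alt label dq
instance (label : String) (dq : List (String × Int)) (out : Option (Int × Int)) : Decidable (Spec_remove_by_label label dq out) := by unfold Spec_remove_by_label; infer_instance

-- ===== CLAIM (what is proved, stated in full; the proofs are below) =====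
def Claim_equal_remove_by_label : Prop := ∀ (label : String) (dq : List (String × Int)), Dom_remove_by_label label dq → Spec_remove_by_label label dq (remove_by_label label dq)

-- ===== LEMMAS AND PROOFS =====

-- shifting both the length and the start index of the reverse scan by one changes nothing
theorem pvRevSearch_shift (label : String) (l : List (String × Int)) :
    ∀ (n j : Int), pvRevSearch label (n + 1) (j + 1) l = pvRevSearch label n j l := by
  induction l with
  | nil => intro n j; rfl
  | cons x rest ih =>
    intro n j
    simp only [pvRevSearch]
    have h : n + 1 - 1 - (j + 1) = n - 1 - j := by ring
    rw [h]
    split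
    · rfl
    · exact ih n (j + 1)

theorem remove_by_label_eq_alt (label : String) (dq : List (String × Int)) :
    remove_by_label label dq = remove_by_label_alt label dq := by
  induction dq using List.reverseRecOn with
  | nil => rfl
  | append_singleton xs x ih =>
    simp only [remove_by_label, remove_by_label_alt] at ih
    simp only [remove_by_label, remove_by_label_alt, PySem.List.enumerate_append,
      PySem.List.enumerate_cons, PySem.List.enumerate_nil, List.foldl_append, List.foldl_cons,
      List.foldl_nil, List.reverse_append, List.reverse_cons, List.reverse_nil, List.nil_append,
      List.cons_append, List.length_append, List.length_cons, List.length_nil, pvRevSearch]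
    by_cases h : x.1 == label
    · simp only [h, if_true]
      have hc : ((xs.length + (0 + 1) : ℕ) : Int) - 1 - 0 = 0 + (xs.length : Int) := by
        push_cast; ring
      rw [hc]
    · simp only [h, Bool.false_eq_true, if_false]
      have hc : ((xs.length + (0 + 1) : ℕ) : Int) = (xs.length : Int) + 1 := by
        push_cast; ring
      rw [hc, pvRevSearch_shift]
      exact ih

-- ===== VERDICT (by name: the statement is the Claim_ definition above) =====
theorem remove_by_label_spec : Claim_equal_remove_by_label := by
  intro label dq _
  exact remove_by_label_eq_alt label dq
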